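-- pv_equiv track=rewrite | github.com/luducat/luducat | luducat/plugins/steam/steamscraper/steam_scraper.py | _is_age_gate
-- ===== SOURCE A (Python) =====
-- def _is_age_gate(html: str) -> bool:
--     """Check if the response is an age gate page.
--
--     Args:
--         html: HTML content to check
--
--     Returns:
--         True if age gate detected, False otherwise
--     """
--     age_gate_indicators = [
--         'app_agegate',
--         'Please enter your birth date',
--         'agegate_birthday_selector',
--         'agecheck_form'
--     ]
--     return any(indicator in html for indicator in age_gate_indicators)
-- ===== SOURCE B (Python) =====
-- def _is_age_gate(html: str) -> bool:
--     """Single left-to-right scan: at each position check whether one of the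
--     four indicator literals starts there, instead of four separate 'in' scans."""
--     pats = ('app_agegate',
--             'Please enter your birth date',
--             'agegate_birthday_selector',
--             'agecheck_form')
--     for i in range(len(html)):
--         for p in pats:
--             if html.startswith(p, i):
--                 return True
--     return False
-- ===== Notes on version B (the rewrite author's own statement) =====
-- stated objective: alternative
-- what changed: Replaces four independent whole-string substring scans with one manual left-to-right pass that tests all four indicators at each position.
import Mathlib
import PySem

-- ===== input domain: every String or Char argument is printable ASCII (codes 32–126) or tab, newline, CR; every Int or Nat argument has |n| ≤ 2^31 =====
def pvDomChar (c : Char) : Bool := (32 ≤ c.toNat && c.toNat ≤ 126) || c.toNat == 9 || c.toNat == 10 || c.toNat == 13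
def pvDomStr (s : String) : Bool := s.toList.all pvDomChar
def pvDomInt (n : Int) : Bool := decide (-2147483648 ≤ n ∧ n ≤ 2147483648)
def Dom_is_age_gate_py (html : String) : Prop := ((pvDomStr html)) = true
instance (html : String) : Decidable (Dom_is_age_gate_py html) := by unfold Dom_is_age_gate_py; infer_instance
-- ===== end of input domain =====

-- B replaces A's four independent substring scans with one left-to-right pass
-- testing all four indicators at each position (objective: alternative).

-- ===== PORT A =====
def is_age_gate_py (html : String) : Bool :=
  (["app_agegate", "Please enter your birth date",
    "agegate_birthday_selector", "agecheck_form"] : List String).any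
    (fun indicator => PySem.Str.isIn indicator html)

-- ===== PORT B =====
def pvPats : List (List Char) :=
  ["app_agegate".toList, "Please enter your birth date".toList,
   "agegate_birthday_selector".toList, "agecheck_form".toList]

-- the two nested loops of B: outer over positions (suffixes), inner over patterns
def pvScan (ps : List (List Char)) : List Char → Bool
  | [] => false
  | c :: rest => if ps.any (fun p => p.isPrefixOf (c :: rest)) then true else pvScan ps rest

def is_age_gate_py_alt (html : String) : Bool := pvScan pvPats html.toList

-- ===== PRECONDITION & SPEC =====
def Spec_is_age_gate_py (html : String) (out : Bool) : Prop := out = is_age_gate_py_alt html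
instance (html : String) (out : Bool) : Decidable (Spec_is_age_gate_py html out) := by unfold Spec_is_age_gate_py; infer_instance

-- ===== CLAIM (what is proved, stated in full; the proofs are below) =====
def Claim_equal_is_age_gate_py : Prop := ∀ (html : String), Dom_is_age_gate_py html → Spec_is_age_gate_py html (is_age_gate_py html)

-- ===== LEMMAS AND PROOFS =====

theorem pvScan_eq_true_iff (ps : List (List Char)) (h : ∀ p ∈ ps, p ≠ []) :
    ∀ l : List Char, pvScan ps l = true ↔ ∃ p ∈ ps, p <:+: l := by
  intro l
  induction l with
  | nil =>
    simp only [pvScan, Bool.false_eq_true, false_iff]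
    rintro ⟨p, hp, hinf⟩
    exact h p hp (List.eq_nil_of_infix_nil hinf)
  | cons c rest ih =>
    simp only [pvScan]
    split
    · rename_i hany
      simp only [List.any_eq_true] at hany
      obtain ⟨p, hp, hpre⟩ := hany
      simp only [true_iff]
      exact ⟨p, hp, ((List.isPrefixOf_iff_prefix).mp hpre).isInfix⟩
    · rename_i hany
      simp only [List.any_eq_true, not_exists, not_and] at hany
      rw [ih]
      constructor
      · rintro ⟨p, hp, hinf⟩
        exact ⟨p, hp, List.infix_cons hinf⟩
      · rintro ⟨p, hp, hinf⟩
        rcases List.infix_cons_iff.mp hinf with hpre | hinf'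
        · exact absurd ((List.isPrefixOf_iff_prefix).mpr hpre) (by simpa using hany p hp)
        · exact ⟨p, hp, hinf'⟩

-- ===== VERDICT (by name: the statement is the Claim_ definition above) =====
theorem is_age_gate_py_spec : Claim_equal_is_age_gate_py := by
  intro html _
  unfold Spec_is_age_gate_py
  have hne : ∀ p ∈ pvPats, p ≠ [] := by decide
  have hb := pvScan_eq_true_iff pvPats hne html.toList
  rw [Bool.eq_iff_iff]
  rw [is_age_gate_py_alt, hb]
  simp [is_age_gate_py, pvPats, PySem.Chars.isIn_iff_infix]
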